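-- pv_equiv track=rewrite | github.com/connor924/project-euler | problem32.py | has_pandigital_product_identity
-- ===== SOURCE A (Python) =====
-- def has_pandigital_product_identity(i, j):
--     pandigital_str = str(i) + str(j) + str(i*j)
--     if len(pandigital_str) != 9:
--         return False
--     else:
--         digit_set = ['1','2','3','4','5','6','7','8','9']
--         for digit in digit_set:
--             if digit not in pandigital_str:
--                 return False
--         return True
-- ===== SOURCE B (Python) =====
-- def has_pandigital_product_identity(i, j):
--     seen = set()
--     for part in (i, j, i * j):
--         for ch in str(part):
--             if ch not in '123456789' or ch in seen:
--                 return False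
--             seen.add(ch)
--     return len(seen) == 9
-- ===== Notes on version B (the rewrite author's own statement) =====
-- stated objective: alternative
-- what changed: Replaces the length-9 guard plus a scan over the nine digits testing membership in the concatenated string by a single left-to-right pass over the digit characters maintaining a seen-set, rejecting early on any non-1-9 character or duplicate, and finally checking the set has nine elements.
import Mathlib
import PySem

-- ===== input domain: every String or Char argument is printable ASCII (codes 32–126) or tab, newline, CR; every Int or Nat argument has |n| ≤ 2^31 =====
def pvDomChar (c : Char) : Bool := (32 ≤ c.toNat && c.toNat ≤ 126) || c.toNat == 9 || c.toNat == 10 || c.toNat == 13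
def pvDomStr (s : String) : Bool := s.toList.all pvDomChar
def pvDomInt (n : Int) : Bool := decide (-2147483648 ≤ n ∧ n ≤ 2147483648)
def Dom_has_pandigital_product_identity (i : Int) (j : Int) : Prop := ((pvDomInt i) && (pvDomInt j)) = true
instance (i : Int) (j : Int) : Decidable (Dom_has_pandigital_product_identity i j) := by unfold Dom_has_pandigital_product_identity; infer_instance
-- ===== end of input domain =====

-- B replaces A's length guard plus per-digit membership scan by a single pass over
-- the digit characters with a seen-set and early exit (alternative, same cost).

-- ===== PORT A =====
-- str(i)+str(j)+str(i*j) as its list of characters (PySem.Int.toChars = str(n))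
def has_pandigital_product_identity (i : Int) (j : Int) : Bool :=
  let pandigital_str : List Char :=
    PySem.Int.toChars i ++ PySem.Int.toChars j ++ PySem.Int.toChars (i * j)
  if pandigital_str.length ≠ 9 then false
  else
    let digit_set : List Char := ['1','2','3','4','5','6','7','8','9']
    -- 'for digit in digit_set: if digit not in pandigital_str: return False; return True'
    digit_set.all (fun digit => decide (digit ∈ pandigital_str))

-- ===== PORT B =====
-- one character of Source B's inner loop: none = 'return False' has happened,
-- some seen = the seen-set so far
def pdStep (acc : Option (PySem.Set Char)) (ch : Char) : Option (PySem.Set Char) :=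
  match acc with
  | none => none
  | some seen =>
      if ch ∉ (['1','2','3','4','5','6','7','8','9'] : List Char) ∨ ch ∈ seen then none
      else some (PySem.Set.add seen ch)

def has_pandigital_product_identity_alt (i : Int) (j : Int) : Bool :=
  -- for part in (i, j, i*j): for ch in str(part): …
  match (PySem.Int.toChars (i * j)).foldl pdStep
          ((PySem.Int.toChars j).foldl pdStep
            ((PySem.Int.toChars i).foldl pdStep (some PySem.Set.empty))) with
  | none => false
  | some seen => seen.length == 9   -- len(seen) == 9

-- ===== PRECONDITION & SPEC =====
def Spec_has_pandigital_product_identity (i : Int) (j : Int) (out : Bool) : Prop := out = has_pandigital_product_identity_alt i j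
instance (i : Int) (j : Int) (out : Bool) : Decidable (Spec_has_pandigital_product_identity i j out) := by unfold Spec_has_pandigital_product_identity; infer_instance

-- ===== CLAIM (what is proved, stated in full; the proofs are below) =====
def Claim_equal_has_pandigital_product_identity : Prop := ∀ (i : Int) (j : Int), Dom_has_pandigital_product_identity i j → Spec_has_pandigital_product_identity i j (has_pandigital_product_identity i j)

-- ===== LEMMAS AND PROOFS =====

theorem pd_foldl_none (cs : List Char) : cs.foldl pdStep none = none := by
  induction cs with
  | nil => rfl
  | cons c cs ih => simpa [pdStep] using ih

-- characterization of Source B's loop from a duplicate-free seen-list l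
theorem pd_go_some_iff (cs : List Char) (l l' : List Char) (hl : l.Nodup) :
    cs.foldl pdStep (some l) = some l' ↔
      ((∀ c ∈ cs, c ∈ (['1','2','3','4','5','6','7','8','9'] : List Char)) ∧
       (l ++ cs).Nodup ∧ l' = l ++ cs) := by
  induction cs generalizing l l' with
  | nil => simp [hl]; tauto
  | cons c cs ih =>
      by_cases h : c ∉ (['1','2','3','4','5','6','7','8','9'] : List Char) ∨ c ∈ l
      · rw [List.foldl_cons, show pdStep (some l) c = none by
              simp only [pdStep]; rw [if_pos h], pd_foldl_none]
        constructor
        · intro hc; cases hc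
        · rintro ⟨hdig, hnd, -⟩
          rcases h with h | h
          · exact (h (hdig c (by simp))).elim
          · exact ((List.nodup_append.mp hnd).2.2 c h c (by simp) rfl).elim
      · rw [not_or, not_not] at h
        have hadd : PySem.Set.add l c = l ++ [c] := by
          simp [PySem.Set.add, h.2]
        rw [List.foldl_cons, show pdStep (some l) c = some (l ++ [c]) by
              simp only [pdStep]; rw [if_neg (not_or.mpr ⟨not_not.mpr h.1, h.2⟩), hadd]]
        have hl' : (l ++ [c]).Nodup := by
          simp [List.nodup_append, hl]
          exact fun a ha hac => h.2 (hac ▸ ha)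
        rw [ih (l ++ [c]) l' hl']
        constructor
        · rintro ⟨hdig, hnd, rfl⟩
          refine ⟨?_, by simpa using hnd, by simp⟩
          intro x hx
          rcases List.mem_cons.mp hx with rfl | hx
          · exact h.1
          · exact hdig x hx
        · rintro ⟨hdig, hnd, rfl⟩
          exact ⟨fun x hx => hdig x (by simp [hx]), by simpa using hnd, by simp⟩

-- the two checks agree on any character list s
theorem pd_check_eq (s : List Char) :
    (if s.length ≠ 9 then false
     else (['1','2','3','4','5','6','7','8','9'] : List Char).all
            (fun digit => decide (digit ∈ s)))
    = (match s.foldl pdStep (some PySem.Set.empty) with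
       | none => false
       | some seen => seen.length == 9) := by
  rcases hr : s.foldl pdStep (some PySem.Set.empty) with _ | seen
  · -- loop bailed out: some char is not a digit 1-9 or repeats, so A is false too
    by_cases hlen : s.length = 9
    · rw [if_neg (by omega)]
      refine (Bool.eq_false_iff.mpr (fun hall => ?_)).trans rfl
      have hsub : (['1','2','3','4','5','6','7','8','9'] : List Char) ⊆ s :=
        fun d hdm => of_decide_eq_true (List.all_eq_true.mp hall d hdm)
      have hnd : (['1','2','3','4','5','6','7','8','9'] : List Char).Nodup := by decide
      have hperm : (['1','2','3','4','5','6','7','8','9'] : List Char).Perm s :=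
        (hnd.subperm hsub).perm_of_length_le (by simp [hlen])
      have : s.foldl pdStep (some ([] : List Char)) = some ([] ++ s) :=
        (pd_go_some_iff s [] ([] ++ s) (by simp)).mpr
          ⟨fun c hc => hperm.mem_iff.mpr hc, by simpa using hperm.nodup_iff.mp hnd, rfl⟩
      rw [show (some ([] : List Char)) = some PySem.Set.empty from rfl, hr] at this
      cases this
    · rw [if_pos (by omega)]
  · -- loop finished: s is duplicate-free and all digits 1-9, seen = s
    obtain ⟨hdig, hnd, hse⟩ :=
      (pd_go_some_iff s [] seen (by simp)).mp (by simpa [PySem.Set.empty] using hr)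
    rw [hse]
    simp only [List.nil_append] at hdig hnd ⊢
    by_cases hlen : s.length = 9
    · rw [if_neg (by omega)]
      have hperm : (['1','2','3','4','5','6','7','8','9'] : List Char).Perm s := by
        have hsp : List.Subperm s (['1','2','3','4','5','6','7','8','9'] : List Char) :=
          hnd.subperm (fun c hc => hdig c hc)
        exact (hsp.perm_of_length_le (by simp [hlen])).symm
      rw [show (s.length == 9) = true by simp [hlen]]
      exact List.all_eq_true.mpr (fun d hdm => decide_eq_true (hperm.mem_iff.mp hdm))
    · rw [if_pos (by omega), show (s.length == 9) = false by simp [hlen]]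

-- ===== VERDICT (by name: the statement is the Claim_ definition above) =====
theorem has_pandigital_product_identity_spec : Claim_equal_has_pandigital_product_identity := by
  intro i j _
  unfold Spec_has_pandigital_product_identity has_pandigital_product_identity has_pandigital_product_identity_alt
  rw [← List.foldl_append, ← List.foldl_append, ← List.append_assoc]
  exact pd_check_eq _
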